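-- pv_equiv track=rewrite | github.com/idiotgrape223/DAON-VMate | core/model_profile.py | _pick_auto_tap_from_catalog
-- ===== SOURCE A (Python) =====
-- from typing import Any, Optional
--
-- def _pick_auto_tap_from_catalog(catalog: dict[str, int]) -> Optional[tuple[str, int]]:
--     """model3.json 에 실제로 있는 그룹만 사용."""
--     if not catalog:
--         return None
--     for name in ("Tap", "TapBody", "FlickUp", "TapHead"):
--         n = catalog.get(name, 0)
--         if n > 0:
--             return (name, 0)
--     for name in ("HitAreaBody", "HitAreaHead"):
--         n = catalog.get(name, 0)
--         if n > 0:
--             return (name, 0)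
--     if catalog.get("") and catalog[""] > 0:
--         return ("", 0)
--     n_idle = catalog.get("Idle", 0)
--     if n_idle > 0:
--         return ("Idle", 0)
--     for k in sorted(catalog.keys()):
--         if catalog[k] > 0:
--             return (k, 0)
--     return None
-- ===== SOURCE B (Python) =====
-- from typing import Any, Optional
--
-- _PRIORITY = ("Tap", "TapBody", "FlickUp", "TapHead", "HitAreaBody", "HitAreaHead", "", "Idle")
-- _RANK = {name: i for i, name in enumerate(_PRIORITY)}
--
--
-- def _pick_auto_tap_from_catalog(catalog: dict[str, int]) -> Optional[tuple[str, int]]: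
--     """Single pass: keep the positive-valued key minimal under (priority rank, name)."""
--     best = None
--     for k, v in catalog.items():
--         if v > 0:
--             key = (_RANK.get(k, len(_PRIORITY)), k)
--             if best is None or key < best:
--                 best = key
--     return None if best is None else (best[1], 0)
-- ===== Notes on version B (the rewrite author's own statement) =====
-- stated objective: alternative
-- what changed: A's cascade of early-return scans (two priority loops, two special-case checks, then sorting the keys and scanning them) is replaced by a single pass over the items that keeps the positive-valued key minimal under the composite key (priority rank from a table, name); one traversal and no sort.
import Mathlib
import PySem

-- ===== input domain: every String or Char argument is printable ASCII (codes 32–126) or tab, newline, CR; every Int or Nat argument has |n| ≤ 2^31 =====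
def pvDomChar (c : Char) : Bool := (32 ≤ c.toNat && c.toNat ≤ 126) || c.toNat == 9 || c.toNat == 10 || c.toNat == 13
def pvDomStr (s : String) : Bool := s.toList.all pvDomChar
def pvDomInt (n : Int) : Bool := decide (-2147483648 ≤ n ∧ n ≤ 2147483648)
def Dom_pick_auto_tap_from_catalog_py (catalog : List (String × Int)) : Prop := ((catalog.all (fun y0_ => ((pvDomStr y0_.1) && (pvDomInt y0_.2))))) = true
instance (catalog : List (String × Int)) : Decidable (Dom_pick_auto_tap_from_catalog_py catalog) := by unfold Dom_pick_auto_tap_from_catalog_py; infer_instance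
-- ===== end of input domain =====

-- B replaces A's cascade of early-return scans by a single table-driven pass keeping the
-- positive-valued key minimal under (priority rank, name); objective: alternative decomposition.

-- ===== PORT A =====
-- truthiness of `catalog.get("")` (None -> falsy, 0 -> falsy)
def pvTruthy : Option Int → Bool
  | some v => v != 0
  | none => false

-- `for name in (...): n = catalog.get(name, 0); if n > 0: return (name, 0)`
def pvLoopNames (d : PySem.Dict String Int) : List String → Option (String × Int)
  | [] => none
  | name :: rest =>
    let n := PySem.Dict.getD d name 0
    if 0 < n then some (name, 0) else pvLoopNames d rest

-- `for k in sorted(catalog.keys()): if catalog[k] > 0: return (k, 0)`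
-- (`catalog[k]` cannot raise: k comes from catalog.keys(), so `getD _ _ 0` is exact here)
def pvLoopSorted (d : PySem.Dict String Int) : List String → Option (String × Int)
  | [] => none
  | k :: rest =>
    if 0 < PySem.Dict.getD d k 0 then some (k, 0) else pvLoopSorted d rest

def pick_auto_tap_from_catalog_py (catalog : List (String × Int)) : Option (String × Int) :=
  let d := PySem.Dict.mk catalog
  if catalog = [] then none
  else
    match pvLoopNames d ["Tap", "TapBody", "FlickUp", "TapHead"] with
    | some r => some r
    | none =>
      match pvLoopNames d ["HitAreaBody", "HitAreaHead"] with
      | some r => some r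
      | none =>
        if pvTruthy (PySem.Dict.get? d "") && decide (0 < PySem.Dict.getD d "" 0) then
          some ("", 0)
        else
          let n_idle := PySem.Dict.getD d "Idle" 0
          if 0 < n_idle then some ("Idle", 0)
          else pvLoopSorted d (PySem.List.sorted (PySem.Dict.keys d) (fun k => k) false)

-- ===== PORT B =====
-- _RANK = {name: i for i, name in enumerate(_PRIORITY)}
def pvRankDict : PySem.Dict String Int :=
  PySem.Dict.mk [("Tap", 0), ("TapBody", 1), ("FlickUp", 2), ("TapHead", 3),
                 ("HitAreaBody", 4), ("HitAreaHead", 5), ("", 6), ("Idle", 7)]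

-- Python tuple comparison `key < best` on (int, str)
def pvKeyLt (a b : Int × String) : Bool :=
  a.1 < b.1 || (a.1 == b.1 && PySem.Chars.strLt a.2.toList b.2.toList)

-- loop body: `if v > 0: key = (_RANK.get(k, 8), k); if best is None or key < best: best = key`
def pvStep (best : Option (Int × String)) (kv : String × Int) : Option (Int × String) :=
  if 0 < kv.2 then
    let key := (PySem.Dict.getD pvRankDict kv.1 8, kv.1)
    match best with
    | none => some key
    | some b => if pvKeyLt key b then some key else some b
  else best

def pick_auto_tap_from_catalog_py_alt (catalog : List (String × Int)) : Option (String × Int) :=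
  match catalog.foldl pvStep none with
  | none => none
  | some b => some (b.2, 0)

-- ===== PRECONDITION & SPEC =====
-- Pre_ excludes association lists with duplicate keys: a Python dict can never contain
-- them, so such lists represent no actual input of A, and on them A's first-match lookup
-- and B's per-item traversal may accidentally disagree.
def Pre_pick_auto_tap_from_catalog_py (catalog : List (String × Int)) : Prop :=
  (catalog.map Prod.fst).Nodup

instance (catalog : List (String × Int)) : Decidable (Pre_pick_auto_tap_from_catalog_py catalog) := by
  unfold Pre_pick_auto_tap_from_catalog_py; infer_instance

def pvWitness_pick_auto_tap_from_catalog_py : (List (String × Int)) :=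
  [("Tap", 2), ("a", -1)]

def Spec_pick_auto_tap_from_catalog_py (catalog : List (String × Int)) (out : Option (String × Int)) : Prop := out = pick_auto_tap_from_catalog_py_alt catalog
instance (catalog : List (String × Int)) (out : Option (String × Int)) : Decidable (Spec_pick_auto_tap_from_catalog_py catalog out) := by unfold Spec_pick_auto_tap_from_catalog_py; infer_instance

-- ===== CLAIM (what is proved, stated in full; the proofs are below) =====
def Claim_equal_pick_auto_tap_from_catalog_py : Prop := ∀ (catalog : List (String × Int)), Dom_pick_auto_tap_from_catalog_py catalog → Pre_pick_auto_tap_from_catalog_py catalog → Spec_pick_auto_tap_from_catalog_py catalog (pick_auto_tap_from_catalog_py catalog)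

-- ===== LEMMAS AND PROOFS =====

-- the rank table as a plain function
def pvRankF (k : String) : Int :=
  if k = "Tap" then 0 else if k = "TapBody" then 1 else if k = "FlickUp" then 2
  else if k = "TapHead" then 3 else if k = "HitAreaBody" then 4 else if k = "HitAreaHead" then 5
  else if k = "" then 6 else if k = "Idle" then 7 else 8

theorem pvRank_eq (k : String) : PySem.Dict.getD pvRankDict k 8 = pvRankF k := by
  by_cases h1 : k = "Tap"; · subst h1; decide
  by_cases h2 : k = "TapBody"; · subst h2; decide
  by_cases h3 : k = "FlickUp"; · subst h3; decide
  by_cases h4 : k = "TapHead"; · subst h4; decide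
  by_cases h5 : k = "HitAreaBody"; · subst h5; decide
  by_cases h6 : k = "HitAreaHead"; · subst h6; decide
  by_cases h7 : k = ""; · subst h7; decide
  by_cases h8 : k = "Idle"; · subst h8; decide
  have n : ∀ s : String, ¬ k = s → (s == k) = false := fun s h => by
    simp [beq_eq_false_iff_ne]; exact fun hh => h hh.symm
  simp [pvRankDict, pvRankF, PySem.Dict.getD_eq_get?_getD,
        n _ h1, n _ h2, n _ h3, n _ h4, n _ h5, n _ h6, n _ h7, n _ h8,
        h1, h2, h3, h4, h5, h6, h7, h8, PySem.Dict.get?]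

theorem pvKeyLt_iff (a b : Int × String) :
    pvKeyLt a b = true ↔ (a.1 < b.1 ∨ (a.1 = b.1 ∧ a.2 < b.2)) := by
  simp [pvKeyLt, PySem.Chars.strLt, String.lt_iff_toList_lt]

theorem pvKeyLt_false_iff (a b : Int × String) :
    pvKeyLt a b = false ↔ ¬ (a.1 < b.1 ∨ (a.1 = b.1 ∧ a.2 < b.2)) := by
  rw [← pvKeyLt_iff, Bool.eq_false_iff]

theorem pvKeyLt_irrefl (a : Int × String) : pvKeyLt a a = false := by
  simp [pvKeyLt, PySem.Chars.strLt]

theorem pvKeyLt_le_trans {x y z : Int × String}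
    (h1 : pvKeyLt x y = false) (h2 : pvKeyLt y z = false) : pvKeyLt x z = false := by
  rw [pvKeyLt_false_iff] at *
  push Not at h1 h2 ⊢
  obtain ⟨h1a, h1b⟩ := h1; obtain ⟨h2a, h2b⟩ := h2
  refine ⟨by omega, fun hxz => ?_⟩
  have e1 : x.1 = y.1 := by omega
  have e2 : y.1 = z.1 := by omega
  exact not_lt.mpr (le_trans (not_lt.mp (h2b e2)) (not_lt.mp (h1b e1)))

theorem pvKeyLt_lt_le {x a b : Int × String}
    (h1 : pvKeyLt x a = true) (h2 : pvKeyLt x b = false) : pvKeyLt a b = false := by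
  rw [pvKeyLt_iff] at h1
  rw [pvKeyLt_false_iff] at *
  push Not at h2 ⊢
  obtain ⟨h2a, h2b⟩ := h2
  rcases h1 with h1 | ⟨h1e, h1s⟩
  · exact ⟨by omega, fun hab => absurd hab (by omega)⟩
  · refine ⟨by omega, fun hab => ?_⟩
    exact le_trans (h2b (by omega)) (le_of_lt h1s)

theorem pvKeyLt_total {x y : Int × String} (h : x.2 ≠ y.2) :
    pvKeyLt x y = true ∨ pvKeyLt y x = true := by
  rw [pvKeyLt_iff, pvKeyLt_iff]
  rcases lt_trichotomy x.1 y.1 with hc | hc | hc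
  · exact Or.inl (Or.inl hc)
  · rcases lt_trichotomy x.2 y.2 with hs | hs | hs
    · exact Or.inl (Or.inr ⟨hc, hs⟩)
    · exact absurd hs h
    · exact Or.inr (Or.inr ⟨hc.symm, hs⟩)
  · exact Or.inr (Or.inl hc)

-- the rank determines the name below 8
set_option maxHeartbeats 1000000 in
theorem pvRankF_inj {k N : String} (h8 : pvRankF N ≠ 8) (he : pvRankF k = pvRankF N) : k = N := by
  unfold pvRankF at h8 he
  split_ifs at h8 he <;> first | (subst_vars; rfl) | omega

theorem pvGetD_pos_get? (d : PySem.Dict String Int) (k : String)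
    (h : 0 < PySem.Dict.getD d k 0) : PySem.Dict.get? d k = some (PySem.Dict.getD d k 0) := by
  cases hg : PySem.Dict.get? d k with
  | none => rw [PySem.Dict.getD_eq_get?_getD, hg] at h; simp at h
  | some v => rw [PySem.Dict.getD_eq_get?_getD, hg]; rfl

theorem pvP_mem_keys (d : PySem.Dict String Int) (k : String)
    (h : 0 < PySem.Dict.getD d k 0) : k ∈ PySem.Dict.keys d := by
  by_contra hk
  rw [← PySem.Dict.get?_eq_none_iff_not_mem_keys] at hk
  rw [pvGetD_pos_get? d k h] at hk
  exact Option.some_ne_none _ hk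

theorem pvMin_of_prio (d : PySem.Dict String Int) (N : String) (h8 : pvRankF N ≠ 8)
    (hprev : ∀ k, pvRankF k < pvRankF N → ¬ 0 < PySem.Dict.getD d k 0) :
    ∀ k', 0 < PySem.Dict.getD d k' 0 → pvKeyLt (pvRankF k', k') (pvRankF N, N) = false := by
  intro k' hP
  rw [pvKeyLt_false_iff]
  rintro (hlt | ⟨heq, hlts⟩)
  · exact hprev k' hlt hP
  · exact absurd hlts (by rw [pvRankF_inj h8 heq]; exact lt_irrefl N)

theorem pvTruthy_cond (d : PySem.Dict String Int) :
    ((pvTruthy (PySem.Dict.get? d "") && decide (0 < PySem.Dict.getD d "" 0)) = true)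
      ↔ 0 < PySem.Dict.getD d "" 0 := by
  cases hg : PySem.Dict.get? d "" with
  | none => simp [pvTruthy, hg, PySem.Dict.getD_eq_get?_getD]
  | some v =>
    simp [pvTruthy, hg, PySem.Dict.getD_eq_get?_getD]
    omega

theorem pvStep_ne_none {kv : String × Int} (hp : 0 < kv.2) (acc : Option (Int × String)) :
    pvStep acc kv ≠ none := by
  cases acc <;> simp [pvStep, hp] <;> split <;> simp

theorem pvStep_neg {kv : String × Int} (hp : ¬ 0 < kv.2) (acc : Option (Int × String)) :
    pvStep acc kv = acc := by
  simp [pvStep, hp]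

theorem pvFold_none (l : List (String × Int)) :
    ∀ acc, l.foldl pvStep acc = none ↔ (acc = none ∧ ∀ kv ∈ l, ¬ 0 < kv.2) := by
  induction l with
  | nil => intro acc; simp
  | cons kv l ih =>
    intro acc
    simp only [List.foldl_cons]
    rw [ih]
    by_cases hp : 0 < kv.2
    · constructor
      · rintro ⟨h1, _⟩; exact absurd h1 (pvStep_ne_none hp acc)
      · rintro ⟨_, h2⟩; exact absurd hp (h2 kv (List.mem_cons_self))
    · rw [pvStep_neg hp]
      constructor
      · rintro ⟨h1, h2⟩
        refine ⟨h1, fun kv' hkv' => ?_⟩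
        rcases List.mem_cons.mp hkv' with h | h
        · subst h; exact hp
        · exact h2 _ h
      · rintro ⟨h1, h2⟩; exact ⟨h1, fun kv' hkv' => h2 _ (List.mem_cons.mpr (Or.inr hkv'))⟩

theorem pvFold_some (l : List (String × Int)) :
    ∀ acc b, l.foldl pvStep acc = some b →
      ((acc = some b ∨ ∃ kv ∈ l, 0 < kv.2 ∧ b = (pvRankF kv.1, kv.1)) ∧
       (∀ a, acc = some a → pvKeyLt a b = false) ∧
       (∀ kv ∈ l, 0 < kv.2 → pvKeyLt (pvRankF kv.1, kv.1) b = false)) := by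
  induction l with
  | nil =>
    intro acc b h
    simp only [List.foldl_nil] at h
    subst h
    exact ⟨Or.inl rfl, fun a ha => by cases ha; exact pvKeyLt_irrefl _, by simp⟩
  | cons kv l ih =>
    intro acc b h
    simp only [List.foldl_cons] at h
    obtain ⟨hex, hacc, hmin⟩ := ih _ _ h
    by_cases hp : 0 < kv.2
    · cases acc with
      | none =>
        have hstep : pvStep none kv = some (pvRankF kv.1, kv.1) := by
          simp [pvStep, hp, pvRank_eq]
        rw [hstep] at hex hacc
        have hb : pvKeyLt (pvRankF kv.1, kv.1) b = false := hacc _ rfl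
        refine ⟨Or.inr ?_, by simp, ?_⟩
        · rcases hex with he | he
          · exact ⟨kv, List.mem_cons_self, hp, (Option.some_injective _ he).symm⟩
          · obtain ⟨kv', h1, h2, h3⟩ := he
            exact ⟨kv', List.mem_cons.mpr (Or.inr h1), h2, h3⟩
        · intro kv' hkv' hp'
          rcases List.mem_cons.mp hkv' with h' | h'
          · subst h'; exact hb
          · exact hmin _ h' hp'
      | some a =>
        have hstep : pvStep (some a) kv =
            if pvKeyLt (pvRankF kv.1, kv.1) a then some (pvRankF kv.1, kv.1) else some a := by
          simp [pvStep, hp, pvRank_eq]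
        rw [hstep] at hex hacc
        by_cases hlt : pvKeyLt (pvRankF kv.1, kv.1) a = true
        · rw [if_pos hlt] at hex hacc
          have hKb : pvKeyLt (pvRankF kv.1, kv.1) b = false := hacc _ rfl
          refine ⟨?_, ?_, ?_⟩
          · rcases hex with he | he
            · exact Or.inr ⟨kv, List.mem_cons_self, hp, (Option.some_injective _ he).symm⟩
            · obtain ⟨kv', h1, h2, h3⟩ := he
              exact Or.inr ⟨kv', List.mem_cons.mpr (Or.inr h1), h2, h3⟩
          · intro a' ha'; cases ha'
            exact pvKeyLt_lt_le hlt hKb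
          · intro kv' hkv' hp'
            rcases List.mem_cons.mp hkv' with h' | h'
            · subst h'; exact hKb
            · exact hmin _ h' hp'
        · rw [if_neg hlt] at hex hacc
          have hab : pvKeyLt a b = false := hacc _ rfl
          refine ⟨?_, ?_, ?_⟩
          · rcases hex with he | he
            · exact Or.inl he
            · obtain ⟨kv', h1, h2, h3⟩ := he
              exact Or.inr ⟨kv', List.mem_cons.mpr (Or.inr h1), h2, h3⟩
          · intro a' ha'; cases ha'; exact hab
          · intro kv' hkv' hp'
            rcases List.mem_cons.mp hkv' with h' | h'
            · subst h'
              exact pvKeyLt_le_trans (Bool.eq_false_iff.mpr hlt) hab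
            · exact hmin _ h' hp'
    · rw [pvStep_neg hp acc] at hex hacc
      refine ⟨?_, hacc, ?_⟩
      · rcases hex with he | he
        · exact Or.inl he
        · obtain ⟨kv', h1, h2, h3⟩ := he
          exact Or.inr ⟨kv', List.mem_cons.mpr (Or.inr h1), h2, h3⟩
      · intro kv' hkv' hp'
        rcases List.mem_cons.mp hkv' with h' | h'
        · subst h'; exact absurd hp' hp
        · exact hmin _ h' hp'

theorem pvLoopSorted_none (d : PySem.Dict String Int) (l : List String) :
    pvLoopSorted d l = none ↔ ∀ k ∈ l, ¬ 0 < PySem.Dict.getD d k 0 := by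
  induction l with
  | nil => simp [pvLoopSorted]
  | cons k l ih =>
    rw [pvLoopSorted]
    by_cases hp : 0 < PySem.Dict.getD d k 0
    · rw [if_pos hp]
      constructor
      · intro h; exact absurd h (Option.some_ne_none _)
      · intro h; exact absurd hp (h k List.mem_cons_self)
    · rw [if_neg hp, ih]
      constructor
      · intro h k' hk'
        rcases List.mem_cons.mp hk' with h' | h'
        · subst h'; exact hp
        · exact h _ h'
      · intro h k' hk'; exact h _ (List.mem_cons.mpr (Or.inr hk'))

theorem pvLoopSorted_some (d : PySem.Dict String Int) :
    ∀ (l : List String) (r : String × Int), pvLoopSorted d l = some r →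
    ∃ pre k suf, l = pre ++ k :: suf ∧ r = (k, 0) ∧ 0 < PySem.Dict.getD d k 0 ∧
      ∀ x ∈ pre, ¬ 0 < PySem.Dict.getD d x 0 := by
  intro l
  induction l with
  | nil => intro r h; simp [pvLoopSorted] at h
  | cons k l ih =>
    intro r h
    by_cases hp : 0 < PySem.Dict.getD d k 0
    · rw [pvLoopSorted, if_pos hp] at h
      exact ⟨[], k, l, by simp, (Option.some_injective _ h).symm, hp, by simp⟩
    · rw [pvLoopSorted, if_neg hp] at h
      obtain ⟨pre, k', suf, h1, h2, h3, h4⟩ := ih r h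
      refine ⟨k :: pre, k', suf, by simp [h1], h2, h3, ?_⟩
      intro x hx
      rcases List.mem_cons.mp hx with hx | hx
      · subst hx; exact hp
      · exact h4 _ hx

set_option maxHeartbeats 1000000 in
theorem pvA_char (catalog : List (String × Int)) :
    (pick_auto_tap_from_catalog_py catalog = none →
        ∀ k, ¬ 0 < PySem.Dict.getD (PySem.Dict.mk catalog) k 0) ∧
    (∀ r, pick_auto_tap_from_catalog_py catalog = some r →
        ∃ k, r = (k, 0) ∧ 0 < PySem.Dict.getD (PySem.Dict.mk catalog) k 0 ∧
          ∀ k', 0 < PySem.Dict.getD (PySem.Dict.mk catalog) k' 0 →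
            pvKeyLt (pvRankF k', k') (pvRankF k, k) = false) := by
  by_cases hemp : catalog = []
  · subst hemp
    constructor
    · intro _ k
      simp [PySem.Dict.getD_eq_get?_getD, PySem.Dict.get?]
    · intro r hr
      simp [pick_auto_tap_from_catalog_py] at hr
  by_cases c1 : 0 < PySem.Dict.getD (PySem.Dict.mk catalog) "Tap" 0
  · have hval : pick_auto_tap_from_catalog_py catalog = some ("Tap", 0) := by
      simp [pick_auto_tap_from_catalog_py, pvLoopNames, hemp, c1]
    refine ⟨fun hnone => absurd (hval ▸ hnone) (Option.some_ne_none _), fun r hr => ?_⟩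
    rw [hval] at hr
    refine ⟨"Tap", (Option.some_injective _ hr).symm, c1,
      pvMin_of_prio _ _ (by decide) ?_⟩
    intro k hk
    rw [show pvRankF "Tap" = 0 from by decide] at hk
    unfold pvRankF at hk
    split_ifs at hk <;> first | omega | (subst_vars; assumption)
  by_cases c2 : 0 < PySem.Dict.getD (PySem.Dict.mk catalog) "TapBody" 0
  · have hval : pick_auto_tap_from_catalog_py catalog = some ("TapBody", 0) := by
      simp [pick_auto_tap_from_catalog_py, pvLoopNames, hemp, c1, c2]
    refine ⟨fun hnone => absurd (hval ▸ hnone) (Option.some_ne_none _), fun r hr => ?_⟩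
    rw [hval] at hr
    refine ⟨"TapBody", (Option.some_injective _ hr).symm, c2,
      pvMin_of_prio _ _ (by decide) ?_⟩
    intro k hk
    rw [show pvRankF "TapBody" = 1 from by decide] at hk
    unfold pvRankF at hk
    split_ifs at hk <;> first | omega | (subst_vars; assumption)
  by_cases c3 : 0 < PySem.Dict.getD (PySem.Dict.mk catalog) "FlickUp" 0
  · have hval : pick_auto_tap_from_catalog_py catalog = some ("FlickUp", 0) := by
      simp [pick_auto_tap_from_catalog_py, pvLoopNames, hemp, c1, c2, c3]
    refine ⟨fun hnone => absurd (hval ▸ hnone) (Option.some_ne_none _), fun r hr => ?_⟩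
    rw [hval] at hr
    refine ⟨"FlickUp", (Option.some_injective _ hr).symm, c3,
      pvMin_of_prio _ _ (by decide) ?_⟩
    intro k hk
    rw [show pvRankF "FlickUp" = 2 from by decide] at hk
    unfold pvRankF at hk
    split_ifs at hk <;> first | omega | (subst_vars; assumption)
  by_cases c4 : 0 < PySem.Dict.getD (PySem.Dict.mk catalog) "TapHead" 0
  · have hval : pick_auto_tap_from_catalog_py catalog = some ("TapHead", 0) := by
      simp [pick_auto_tap_from_catalog_py, pvLoopNames, hemp, c1, c2, c3, c4]
    refine ⟨fun hnone => absurd (hval ▸ hnone) (Option.some_ne_none _), fun r hr => ?_⟩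
    rw [hval] at hr
    refine ⟨"TapHead", (Option.some_injective _ hr).symm, c4,
      pvMin_of_prio _ _ (by decide) ?_⟩
    intro k hk
    rw [show pvRankF "TapHead" = 3 from by decide] at hk
    unfold pvRankF at hk
    split_ifs at hk <;> first | omega | (subst_vars; assumption)
  by_cases c5 : 0 < PySem.Dict.getD (PySem.Dict.mk catalog) "HitAreaBody" 0
  · have hval : pick_auto_tap_from_catalog_py catalog = some ("HitAreaBody", 0) := by
      simp [pick_auto_tap_from_catalog_py, pvLoopNames, hemp, c1, c2, c3, c4, c5]
    refine ⟨fun hnone => absurd (hval ▸ hnone) (Option.some_ne_none _), fun r hr => ?_⟩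
    rw [hval] at hr
    refine ⟨"HitAreaBody", (Option.some_injective _ hr).symm, c5,
      pvMin_of_prio _ _ (by decide) ?_⟩
    intro k hk
    rw [show pvRankF "HitAreaBody" = 4 from by decide] at hk
    unfold pvRankF at hk
    split_ifs at hk <;> first | omega | (subst_vars; assumption)
  by_cases c6 : 0 < PySem.Dict.getD (PySem.Dict.mk catalog) "HitAreaHead" 0
  · have hval : pick_auto_tap_from_catalog_py catalog = some ("HitAreaHead", 0) := by
      simp [pick_auto_tap_from_catalog_py, pvLoopNames, hemp, c1, c2, c3, c4, c5, c6]
    refine ⟨fun hnone => absurd (hval ▸ hnone) (Option.some_ne_none _), fun r hr => ?_⟩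
    rw [hval] at hr
    refine ⟨"HitAreaHead", (Option.some_injective _ hr).symm, c6,
      pvMin_of_prio _ _ (by decide) ?_⟩
    intro k hk
    rw [show pvRankF "HitAreaHead" = 5 from by decide] at hk
    unfold pvRankF at hk
    split_ifs at hk <;> first | omega | (subst_vars; assumption)
  by_cases c7 : 0 < PySem.Dict.getD (PySem.Dict.mk catalog) "" 0
  · have hb7 : (pvTruthy (PySem.Dict.get? (PySem.Dict.mk catalog) "") &&
        decide (0 < PySem.Dict.getD (PySem.Dict.mk catalog) "" 0)) = true :=
      (pvTruthy_cond _).mpr c7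
    have hval : pick_auto_tap_from_catalog_py catalog = some ("", 0) := by
      simp [pick_auto_tap_from_catalog_py, pvLoopNames, hemp, c1, c2, c3, c4, c5, c6, hb7]
    refine ⟨fun hnone => absurd (hval ▸ hnone) (Option.some_ne_none _), fun r hr => ?_⟩
    rw [hval] at hr
    refine ⟨"", (Option.some_injective _ hr).symm, c7,
      pvMin_of_prio _ _ (by decide) ?_⟩
    intro k hk
    rw [show pvRankF "" = 6 from by decide] at hk
    unfold pvRankF at hk
    split_ifs at hk <;> first | omega | (subst_vars; assumption)
  have hb7 : (pvTruthy (PySem.Dict.get? (PySem.Dict.mk catalog) "") &&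
      decide (0 < PySem.Dict.getD (PySem.Dict.mk catalog) "" 0)) = false :=
    Bool.eq_false_iff.mpr (fun h => c7 ((pvTruthy_cond _).mp h))
  by_cases c8 : 0 < PySem.Dict.getD (PySem.Dict.mk catalog) "Idle" 0
  · have hval : pick_auto_tap_from_catalog_py catalog = some ("Idle", 0) := by
      simp [pick_auto_tap_from_catalog_py, pvLoopNames, hemp, c1, c2, c3, c4, c5, c6, hb7, c8]
    refine ⟨fun hnone => absurd (hval ▸ hnone) (Option.some_ne_none _), fun r hr => ?_⟩
    rw [hval] at hr
    refine ⟨"Idle", (Option.some_injective _ hr).symm, c8,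
      pvMin_of_prio _ _ (by decide) ?_⟩
    intro k hk
    rw [show pvRankF "Idle" = 7 from by decide] at hk
    unfold pvRankF at hk
    split_ifs at hk <;> first | omega | (subst_vars; assumption)
  -- all special names exhausted: A runs the sorted fallback
  have h8 : ∀ k', 0 < PySem.Dict.getD (PySem.Dict.mk catalog) k' 0 → pvRankF k' = 8 := by
    intro k' hP
    unfold pvRankF
    split_ifs with e1 e2 e3 e4 e5 e6 e7 e8
    · exact absurd (e1 ▸ hP) c1
    · exact absurd (e2 ▸ hP) c2
    · exact absurd (e3 ▸ hP) c3
    · exact absurd (e4 ▸ hP) c4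
    · exact absurd (e5 ▸ hP) c5
    · exact absurd (e6 ▸ hP) c6
    · exact absurd (e7 ▸ hP) c7
    · exact absurd (e8 ▸ hP) c8
    · rfl
  have hval : pick_auto_tap_from_catalog_py catalog =
      pvLoopSorted (PySem.Dict.mk catalog)
        (PySem.List.sorted (PySem.Dict.keys (PySem.Dict.mk catalog)) (fun k => k) false) := by
    simp [pick_auto_tap_from_catalog_py, pvLoopNames, hemp, c1, c2, c3, c4, c5, c6, hb7, c8]
  constructor
  · intro hnone k hP
    rw [hval, pvLoopSorted_none] at hnone
    exact hnone k ((PySem.List.mem_sorted _ _ _ _).mpr (pvP_mem_keys _ _ hP)) hP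
  · intro r hr
    rw [hval] at hr
    obtain ⟨pre, k, suf, hdec, hr2, hPk, hpre⟩ := pvLoopSorted_some _ _ _ hr
    refine ⟨k, hr2, hPk, ?_⟩
    intro k' hP'
    rw [pvKeyLt_false_iff]
    rintro (hlt | ⟨heq, hlts⟩)
    · simp only at hlt
      rw [h8 _ hP', h8 _ hPk] at hlt
      omega
    · simp only at hlts
      have hmem : k' ∈ pre ++ k :: suf := by
        rw [← hdec]
        exact (PySem.List.mem_sorted _ _ _ _).mpr (pvP_mem_keys _ _ hP')
      have hpw : (pre ++ k :: suf).Pairwise (fun a b : String => a ≤ b) := by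
        have := PySem.List.sorted_pairwise (xs := PySem.Dict.keys (PySem.Dict.mk catalog))
          (key := fun k : String => k)
        rw [hdec] at this
        exact this
      rcases List.mem_append.mp hmem with hc | hc
      · exact hpre _ hc hP'
      · rcases List.mem_cons.mp hc with hc | hc
        · subst hc; exact lt_irrefl _ hlts
        · have hk : k ≤ k' := (List.pairwise_cons.mp (List.pairwise_append.mp hpw).2.1).1 _ hc
          exact absurd hlts (not_lt.mpr hk)

theorem pvMain (catalog : List (String × Int))
    (hpre : (catalog.map Prod.fst).Nodup) :
    pick_auto_tap_from_catalog_py catalog = pick_auto_tap_from_catalog_py_alt catalog := by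
  have hnd : (PySem.Dict.mk catalog).keys.Nodup := hpre
  obtain ⟨hAnone, hAsome⟩ := pvA_char catalog
  unfold pick_auto_tap_from_catalog_py_alt
  cases hF : catalog.foldl pvStep none with
  | none =>
    obtain ⟨-, hall⟩ := (pvFold_none catalog none).mp hF
    cases hA : pick_auto_tap_from_catalog_py catalog with
    | none => rfl
    | some r =>
      obtain ⟨k, -, hPk, -⟩ := hAsome r hA
      have hg := pvGetD_pos_get? _ _ hPk
      have hm := PySem.Dict.mem_items_of_get?_eq_some _ hg
      exact absurd hPk (by simpa using hall _ hm)
  | some b =>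
    obtain ⟨hex, -, hmin⟩ := pvFold_some catalog none b hF
    rcases hex with hex | ⟨kv, hkv, hpos, hb⟩
    · exact absurd hex.symm (Option.some_ne_none _)
    have hgkv : PySem.Dict.get? (PySem.Dict.mk catalog) kv.1 = some kv.2 :=
      PySem.Dict.get?_of_mem_items _ (by simpa using hkv) hnd
    have hPk2 : 0 < PySem.Dict.getD (PySem.Dict.mk catalog) kv.1 0 := by
      rw [PySem.Dict.getD_eq_get?_getD, hgkv]; exact hpos
    have hBmin : ∀ k', 0 < PySem.Dict.getD (PySem.Dict.mk catalog) k' 0 →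
        pvKeyLt (pvRankF k', k') (pvRankF kv.1, kv.1) = false := by
      intro k' hP'
      have hg' := pvGetD_pos_get? _ _ hP'
      have hm' := PySem.Dict.mem_items_of_get?_eq_some _ hg'
      have := hmin _ (by simpa using hm') (by simpa using hP')
      simpa [hb] using this
    cases hA : pick_auto_tap_from_catalog_py catalog with
    | none => exact absurd hPk2 (hAnone hA kv.1)
    | some r =>
      obtain ⟨k1, hr, hPk1, hAmin⟩ := hAsome r hA
      by_cases hkk : k1 = kv.1
      · rw [hr, hb, hkk]
      · rcases pvKeyLt_total (x := (pvRankF k1, k1)) (y := (pvRankF kv.1, kv.1)) hkk with ht | ht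
        · exact absurd ht (by rw [hBmin _ hPk1]; simp)
        · exact absurd ht (by rw [hAmin _ hPk2]; simp)

-- ===== VERDICT (by name: the statement is the Claim_ definition above) =====
theorem pick_auto_tap_from_catalog_py_spec : Claim_equal_pick_auto_tap_from_catalog_py := by
  intro catalog _ hpre
  unfold Spec_pick_auto_tap_from_catalog_py
  exact pvMain catalog hpre
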